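-- pv_equiv track=rewrite | github.com/parthalon025/ha-aria | _imported_engine/tests/test_power_profiles.py | _make_cycle_series
-- ===== SOURCE A (Python) =====
-- def _make_cycle_series(n_cycles=3, on_watts=100, off_watts=1,
--                        cycle_points=5, gap_points=3):
--     """Build a synthetic power time series with N on/off cycles."""
--     series = []
--     t = 0
--     for i in range(n_cycles):
--         # On phase
--         for j in range(cycle_points):
--             ts = f"2026-02-10T{10 + t // 60:02d}:{t % 60:02d}:00"
--             series.append((ts, on_watts + (j * 5)))
--             t += 5
--         # Off phase
--         for j in range(gap_points):
--             ts = f"2026-02-10T{10 + t // 60:02d}:{t % 60:02d}:00"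
--             series.append((ts, off_watts))
--             t += 5
--     return series
-- ===== SOURCE B (Python) =====
-- def _make_cycle_series(n_cycles=3, on_watts=100, off_watts=1,
--                        cycle_points=5, gap_points=3):
--     """Build a synthetic power time series with N on/off cycles (flat single pass)."""
--     cp = max(cycle_points, 0)
--     gp = max(gap_points, 0)
--     period = cp + gp
--     total = max(n_cycles, 0) * period
--     out = []
--     for g in range(total):
--         t = 5 * g
--         ts = f"2026-02-10T{10 + t // 60:02d}:{t % 60:02d}:00"
--         pos = g % period
--         out.append((ts, on_watts + pos * 5) if pos < cp else (ts, off_watts))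
--     return out
-- ===== Notes on version B (the rewrite author's own statement) =====
-- stated objective: alternative
-- what changed: Replaces the three nested per-cycle/per-phase loops threading a mutable time counter with a single flat loop over the total point count, deriving the timestamp and the on/off phase of each point from its global index by modular arithmetic.
import Mathlib
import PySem

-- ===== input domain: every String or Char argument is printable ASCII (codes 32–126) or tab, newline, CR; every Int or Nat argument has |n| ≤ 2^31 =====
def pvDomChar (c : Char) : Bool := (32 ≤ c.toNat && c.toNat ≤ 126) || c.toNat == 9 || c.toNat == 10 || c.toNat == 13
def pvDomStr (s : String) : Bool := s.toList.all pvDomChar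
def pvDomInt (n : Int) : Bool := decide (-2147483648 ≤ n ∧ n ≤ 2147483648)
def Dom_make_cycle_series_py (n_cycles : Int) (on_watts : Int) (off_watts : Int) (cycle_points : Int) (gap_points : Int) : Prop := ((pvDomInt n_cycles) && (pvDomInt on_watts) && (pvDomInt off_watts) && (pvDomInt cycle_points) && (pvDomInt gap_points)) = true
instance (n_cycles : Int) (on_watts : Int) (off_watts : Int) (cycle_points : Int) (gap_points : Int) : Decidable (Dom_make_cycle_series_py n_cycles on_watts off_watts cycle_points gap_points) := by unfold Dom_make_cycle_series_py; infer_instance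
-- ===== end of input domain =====

-- B replaces A's nested per-cycle/per-phase loops (threading a time counter) with one flat
-- indexed pass using modular arithmetic; same cost, different decomposition (objective: alternative).

-- shared helper: the f-string "2026-02-10T{10 + t // 60:02d}:{t % 60:02d}:00" (both Pythons format it identically)
-- {x:02d} : exact for the values reached here; Python zero-pads iff str(x) is a single digit (0 ≤ x < 10)
def pvPad2 (x : Int) : String :=
  if 0 ≤ x ∧ x < 10 then "0" ++ PySem.Int.toStr x else PySem.Int.toStr x

def pvTs (t : Int) : String :=
  "2026-02-10T" ++ pvPad2 (10 + PySem.Int.floordiv t 60) ++ ":" ++ pvPad2 (PySem.Int.mod t 60) ++ ":00"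

-- ===== PORT A =====
def make_cycle_series_py (n_cycles : Int) (on_watts : Int) (off_watts : Int) (cycle_points : Int) (gap_points : Int) : List (String × Int) :=
  ((PySem.List.pyRange 0 n_cycles 1).foldl
    (fun (st : List (String × Int) × Int) _i =>
      -- On phase
      let st1 := (PySem.List.pyRange 0 cycle_points 1).foldl
        (fun (st : List (String × Int) × Int) j =>
          (st.1 ++ [(pvTs st.2, on_watts + j * 5)], st.2 + 5)) st
      -- Off phase
      (PySem.List.pyRange 0 gap_points 1).foldl
        (fun (st : List (String × Int) × Int) _j =>
          (st.1 ++ [(pvTs st.2, off_watts)], st.2 + 5)) st1)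
    ([], 0)).1

-- ===== PORT B =====
def make_cycle_series_py_alt (n_cycles : Int) (on_watts : Int) (off_watts : Int) (cycle_points : Int) (gap_points : Int) : List (String × Int) :=
  let cp := max cycle_points 0
  let gp := max gap_points 0
  let period := cp + gp
  let total := max n_cycles 0 * period
  (PySem.List.pyRange 0 total 1).map (fun g =>
    let t := 5 * g
    let ts := pvTs t
    let pos := PySem.Int.mod g period
    if pos < cp then (ts, on_watts + pos * 5) else (ts, off_watts))

-- ===== PRECONDITION & SPEC =====
def Spec_make_cycle_series_py (n_cycles : Int) (on_watts : Int) (off_watts : Int) (cycle_points : Int) (gap_points : Int) (out : List (String × Int)) : Prop := out = make_cycle_series_py_alt n_cycles on_watts off_watts cycle_points gap_points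
instance (n_cycles : Int) (on_watts : Int) (off_watts : Int) (cycle_points : Int) (gap_points : Int) (out : List (String × Int)) : Decidable (Spec_make_cycle_series_py n_cycles on_watts off_watts cycle_points gap_points out) := by unfold Spec_make_cycle_series_py; infer_instance

-- ===== CLAIM (what is proved, stated in full; the proofs are below) =====
def Claim_equal_make_cycle_series_py : Prop := ∀ (n_cycles : Int) (on_watts : Int) (off_watts : Int) (cycle_points : Int) (gap_points : Int), Dom_make_cycle_series_py n_cycles on_watts off_watts cycle_points gap_points → Spec_make_cycle_series_py n_cycles on_watts off_watts cycle_points gap_points (make_cycle_series_py n_cycles on_watts off_watts cycle_points gap_points)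

-- ===== LEMMAS AND PROOFS =====

-- common characterisation: one on/off cycle starting at time t0
def pvBlock (ow offw : Int) (cp gp : Nat) (t0 : Int) : List (String × Int) :=
  (List.range cp).map (fun (j : Nat) => (pvTs (t0 + 5 * (j : Int)), ow + (j : Int) * 5))
  ++ (List.range gp).map (fun (j : Nat) => (pvTs (t0 + 5 * (cp : Int) + 5 * (j : Int)), offw))

def pvSpec (nc : Nat) (ow offw : Int) (cp gp : Nat) : List (String × Int) :=
  (List.range nc).flatMap (fun (i : Nat) => pvBlock ow offw cp gp (5 * ((cp : Int) + (gp : Int)) * (i : Int)))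

-- A's on-phase loop
lemma pv_onA (ow : Int) (cp : Nat) (s : List (String × Int)) (t0 : Int) :
    (List.range cp).foldl
      (fun (st : List (String × Int) × Int) (j : Nat) =>
        (st.1 ++ [(pvTs st.2, ow + (j : Int) * 5)], st.2 + 5)) (s, t0)
    = (s ++ (List.range cp).map (fun (j : Nat) => (pvTs (t0 + 5 * (j : Int)), ow + (j : Int) * 5)),
       t0 + 5 * (cp : Int)) := by
  induction cp with
  | zero => simp
  | succ k ih =>
      rw [List.range_succ, List.foldl_append, ih]
      simp only [List.foldl_cons, List.foldl_nil, Prod.mk.injEq]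
      constructor
      · simp [List.append_assoc]
      · push_cast; ring

-- A's off-phase loop
lemma pv_offA (offw : Int) (gp : Nat) (s : List (String × Int)) (t0 : Int) :
    (List.range gp).foldl
      (fun (st : List (String × Int) × Int) (_j : Nat) =>
        (st.1 ++ [(pvTs st.2, offw)], st.2 + 5)) (s, t0)
    = (s ++ (List.range gp).map (fun (j : Nat) => (pvTs (t0 + 5 * (j : Int)), offw)),
       t0 + 5 * (gp : Int)) := by
  induction gp with
  | zero => simp
  | succ k ih =>
      rw [List.range_succ, List.foldl_append, ih]
      simp only [List.foldl_cons, List.foldl_nil, Prod.mk.injEq]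
      constructor
      · simp [List.append_assoc]
      · push_cast; ring

-- A equals the common characterisation
lemma pv_A_char (n ow offw cpi gpi : Int) :
    make_cycle_series_py n ow offw cpi gpi = pvSpec n.toNat ow offw cpi.toNat gpi.toNat := by
  unfold make_cycle_series_py
  rw [PySem.List.pyRange_one, PySem.List.pyRange_one, PySem.List.pyRange_one]
  simp only [sub_zero, List.foldl_map, zero_add]
  have key : ∀ (k : Nat),
      (List.range k).foldl
        (fun (st : List (String × Int) × Int) (_i : Nat) =>
          (List.range gpi.toNat).foldl
            (fun (st : List (String × Int) × Int) (_j : Nat) =>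
              (st.1 ++ [(pvTs st.2, offw)], st.2 + 5))
            ((List.range cpi.toNat).foldl
              (fun (st : List (String × Int) × Int) (j : Nat) =>
                (st.1 ++ [(pvTs st.2, ow + (j : Int) * 5)], st.2 + 5)) st))
        ([], 0)
      = (pvSpec k ow offw cpi.toNat gpi.toNat,
         5 * ((cpi.toNat : Int) + (gpi.toNat : Int)) * (k : Int)) := by
    intro k
    induction k with
    | zero => simp [pvSpec]
    | succ m ih =>
        rw [List.range_succ, List.foldl_append, ih]
        simp only [List.foldl_cons, List.foldl_nil]
        rw [pv_onA, pv_offA]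
        simp only [Prod.mk.injEq]
        constructor
        · simp only [pvSpec, List.range_succ, List.flatMap_append, List.flatMap_cons,
            List.flatMap_nil, List.append_nil, pvBlock, List.append_assoc]
        · push_cast; ring
  exact congrArg Prod.fst (key n.toNat)

-- B's flat pass equals the common characterisation
lemma pv_B_chunk (ow offw : Int) (cp gp nc : Nat) :
    (List.range (cp + gp)).map
      (fun (a : Nat) =>
        if PySem.Int.mod ((nc * (cp + gp) + a : Nat) : Int) ((cp : Int) + (gp : Int)) < (cp : Int)
        then (pvTs (5 * ((nc * (cp + gp) + a : Nat) : Int)),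
              ow + PySem.Int.mod ((nc * (cp + gp) + a : Nat) : Int) ((cp : Int) + (gp : Int)) * 5)
        else (pvTs (5 * ((nc * (cp + gp) + a : Nat) : Int)), offw))
    = pvBlock ow offw cp gp (5 * ((cp : Int) + (gp : Int)) * (nc : Int)) := by
  have hmod : ∀ a : Nat, a < cp + gp →
      PySem.Int.mod ((nc * (cp + gp) + a : Nat) : Int) ((cp : Int) + (gp : Int)) = (a : Int) := by
    intro a ha
    have h1 : ((cp : Int) + (gp : Int)) = ((cp + gp : Nat) : Int) := by push_cast; ring
    rw [h1, PySem.Int.mod_natCast]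
    have h2 : (nc * (cp + gp) + a) % (cp + gp) = a := by
      rw [Nat.add_comm, Nat.add_mul_mod_self_right, Nat.mod_eq_of_lt ha]
    rw [h2]
  rw [List.range_add, List.map_append, List.map_map, pvBlock]
  congr 1
  · apply List.map_congr_left
    intro a ha
    have ha' : a < cp := List.mem_range.mp ha
    rw [hmod a (by omega), if_pos (by exact_mod_cast ha')]
    have ht : (5 : Int) * ((nc * (cp + gp) + a : Nat) : Int)
        = 5 * ((cp : Int) + (gp : Int)) * (nc : Int) + 5 * (a : Int) := by push_cast; ring
    rw [ht]
  · apply List.map_congr_left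
    intro a ha
    have ha' : a < gp := List.mem_range.mp ha
    simp only [Function.comp_def]
    rw [hmod (cp + a) (by omega), if_neg (by push_cast; omega)]
    have ht : (5 : Int) * ((nc * (cp + gp) + (cp + a) : Nat) : Int)
        = 5 * ((cp : Int) + (gp : Int)) * (nc : Int) + 5 * (cp : Int) + 5 * (a : Int) := by
      push_cast; ring
    rw [ht]

lemma pv_B_char (n ow offw cpi gpi : Int) :
    make_cycle_series_py_alt n ow offw cpi gpi = pvSpec n.toNat ow offw cpi.toNat gpi.toNat := by
  unfold make_cycle_series_py_alt
  simp only
  have hcp : max cpi 0 = ((cpi.toNat : Nat) : Int) := by omega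
  have hgp : max gpi 0 = ((gpi.toNat : Nat) : Int) := by omega
  have hn : max n 0 = ((n.toNat : Nat) : Int) := by omega
  rw [hcp, hgp, hn]
  have htot : ((n.toNat : Nat) : Int) * (((cpi.toNat : Nat) : Int) + ((gpi.toNat : Nat) : Int))
      = ((n.toNat * (cpi.toNat + gpi.toNat) : Nat) : Int) := by push_cast; ring
  rw [htot, PySem.List.pyRange_one]
  simp only [sub_zero, Int.toNat_natCast, List.map_map, zero_add]
  generalize n.toNat = nc
  induction nc with
  | zero => simp [pvSpec]
  | succ m ih =>
      have hsplit : (m + 1) * (cpi.toNat + gpi.toNat)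
          = m * (cpi.toNat + gpi.toNat) + (cpi.toNat + gpi.toNat) := by ring
      rw [hsplit, List.range_add, List.map_append, ih, List.map_map]
      have : pvSpec (m + 1) ow offw cpi.toNat gpi.toNat
          = pvSpec m ow offw cpi.toNat gpi.toNat
            ++ pvBlock ow offw cpi.toNat gpi.toNat
                 (5 * ((cpi.toNat : Int) + (gpi.toNat : Int)) * (m : Int)) := by
        simp [pvSpec, List.range_succ]
      rw [this]
      congr 1
      rw [← pv_B_chunk ow offw cpi.toNat gpi.toNat m]
      simp only [Function.comp_def]

-- ===== VERDICT (by name: the statement is the Claim_ definition above) =====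
theorem make_cycle_series_py_spec : Claim_equal_make_cycle_series_py := by
  intro n ow offw cpi gpi _hdom
  unfold Spec_make_cycle_series_py
  rw [pv_A_char, pv_B_char]
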